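-- pv_equiv track=rewrite | github.com/manwar/perlweeklychallenge-club | challenge-337/roger-bell-west/python/ch-2.py | oddmatrix
-- ===== SOURCE A (Python) =====
-- def oddmatrix(rows, cols, points):
--   rm = set()
--   cm = set()
--   for p in points:
--     if p[0] in rm:
--       rm.discard(p[0])
--     else:
--       rm.add(p[0])
--     if p[1] in cm:
--       cm.discard(p[1])
--     else:
--       cm.add(p[1])
--   return len(rm) * (cols - len(cm)) + len(cm) * (rows - len(rm))
-- ===== SOURCE B (Python) =====
-- def oddmatrix(rows, cols, points):
--   # Sort-then-scan: sort each projection, then count maximal runs of odd length.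
--   def odd_runs(xs):
--     odd = 0
--     run = 0
--     prev = None
--     for x in sorted(xs):
--       if prev is not None and x == prev:
--         run += 1
--       else:
--         odd += run % 2
--         run = 1
--       prev = x
--     return odd + run % 2
--   r = odd_runs([p[0] for p in points])
--   c = odd_runs([p[1] for p in points])
--   return r * (cols - c) + c * (rows - r)
-- ===== Notes on version B (the rewrite author's own statement) =====
-- stated objective: alternative
-- what changed: Replaces A's hash-set membership toggling with a sort-then-scan algorithm: each coordinate projection is sorted, a linear scan over the sorted list counts maximal runs of odd length (= indices toggled an odd number of times), then the same closed formula combines the two counts.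
import Mathlib
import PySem

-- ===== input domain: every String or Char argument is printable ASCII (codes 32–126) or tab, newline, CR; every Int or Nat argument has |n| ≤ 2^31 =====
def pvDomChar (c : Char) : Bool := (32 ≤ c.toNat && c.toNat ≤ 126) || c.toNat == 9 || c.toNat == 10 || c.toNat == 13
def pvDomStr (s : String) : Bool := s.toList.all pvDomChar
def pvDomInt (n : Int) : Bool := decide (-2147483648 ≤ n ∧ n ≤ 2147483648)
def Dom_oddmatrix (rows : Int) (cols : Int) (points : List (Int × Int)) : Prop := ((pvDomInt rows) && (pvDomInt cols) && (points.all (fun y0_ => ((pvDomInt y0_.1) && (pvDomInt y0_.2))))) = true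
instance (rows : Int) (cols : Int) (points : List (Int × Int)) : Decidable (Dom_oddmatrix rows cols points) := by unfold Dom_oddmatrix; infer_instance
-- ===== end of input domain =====

-- B replaces A's membership-toggle sets with a sort-then-run-scan algorithm (objective: alternative, same order of cost on these inputs).

-- ===== PORT A =====
-- literal port of A: two parity sets toggled per point, then the closed formula
def oddmatrix (rows : Int) (cols : Int) (points : List (Int × Int)) : Int :=
  let st := points.foldl (fun st p =>
    let rm := if PySem.Set.contains st.1 p.1 then PySem.Set.discard st.1 p.1 else PySem.Set.add st.1 p.1
    let cm := if PySem.Set.contains st.2 p.2 then PySem.Set.discard st.2 p.2 else PySem.Set.add st.2 p.2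
    (rm, cm)) ((PySem.Set.empty : PySem.Set Int), (PySem.Set.empty : PySem.Set Int))
  (st.1.length : Int) * (cols - (st.2.length : Int)) + (st.2.length : Int) * (rows - (st.1.length : Int))

-- ===== PORT B =====
-- literal port of B's loop body: state (odd, run, prev), one step per element of the sorted list
def pvStepB (st : Int × Int × Option Int) (x : Int) : Int × Int × Option Int :=
  if st.2.2 = some x then (st.1, st.2.1 + 1, some x)
  else (st.1 + PySem.Int.mod st.2.1 2, 1, some x)

-- literal port of B's helper odd_runs: sort, scan runs, finalize with the last run's parity
def pvOddRuns (xs : List Int) : Int :=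
  let st := (PySem.List.sorted xs (fun x => x) false).foldl pvStepB (0, 0, none)
  st.1 + PySem.Int.mod st.2.1 2

def oddmatrix_alt (rows : Int) (cols : Int) (points : List (Int × Int)) : Int :=
  let r := pvOddRuns (points.map (fun p => p.1))
  let c := pvOddRuns (points.map (fun p => p.2))
  r * (cols - c) + c * (rows - r)

-- ===== PRECONDITION & SPEC =====
def Spec_oddmatrix (rows : Int) (cols : Int) (points : List (Int × Int)) (out : Int) : Prop := out = oddmatrix_alt rows cols points
instance (rows : Int) (cols : Int) (points : List (Int × Int)) (out : Int) : Decidable (Spec_oddmatrix rows cols points out) := by unfold Spec_oddmatrix; infer_instance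

-- ===== CLAIM (what is proved, stated in full; the proofs are below) =====
def Claim_equal_oddmatrix : Prop := ∀ (rows : Int) (cols : Int) (points : List (Int × Int)), Dom_oddmatrix rows cols points → Spec_oddmatrix rows cols points (oddmatrix rows cols points)

-- ===== LEMMAS AND PROOFS =====

-- A's per-element toggle
def pvTog (s : PySem.Set Int) (x : Int) : PySem.Set Int :=
  if PySem.Set.contains s x then PySem.Set.discard s x else PySem.Set.add s x

lemma pvTog_mem (s : PySem.Set Int) (x y : Int) :
    y ∈ pvTog s x ↔ (if y = x then y ∉ s else y ∈ s) := by
  unfold pvTog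
  split_ifs with h hyx hyx
  · rw [PySem.Set.contains_iff] at h
    rw [PySem.Set.mem_discard]; subst hyx; tauto
  · rw [PySem.Set.contains_iff] at h
    rw [PySem.Set.mem_discard]; tauto
  · rw [PySem.Set.contains_iff] at h
    rw [PySem.Set.mem_add]; subst hyx; tauto
  · rw [PySem.Set.contains_iff] at h
    rw [PySem.Set.mem_add]; tauto

lemma pvTog_nodup (s : PySem.Set Int) (x : Int) (hs : s.Nodup) : (pvTog s x).Nodup := by
  unfold pvTog
  split_ifs
  · exact PySem.Set.nodup_discard _ _ hs
  · exact PySem.Set.nodup_add _ _ hs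

-- invariant for the toggle loop: membership = parity of count xor starting membership
lemma pvTog_fold (xs : List Int) : ∀ s : PySem.Set Int, s.Nodup →
    (xs.foldl pvTog s).Nodup ∧ ∀ y, (y ∈ xs.foldl pvTog s ↔ ((y ∈ s) ↔ xs.count y % 2 = 0)) := by
  induction xs with
  | nil => intro s hs; refine ⟨hs, fun y => by simp⟩
  | cons x xs ih =>
    intro s hs
    obtain ⟨hnd, hmem⟩ := ih (pvTog s x) (pvTog_nodup s x hs)
    refine ⟨hnd, fun y => ?_⟩
    rw [List.foldl_cons, hmem y, pvTog_mem s x y]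
    by_cases hyx : y = x
    · subst hyx
      rw [if_pos rfl, List.count_cons_self]
      by_cases hm : y ∈ s <;> simp [hm] <;> omega
    · rw [if_neg hyx]; simp [Ne.symm hyx]

-- the toggle-set length depends only on the multiset of elements
lemma pvTogLen_perm (ys xs : List Int) (h : ys.Perm xs) :
    (ys.foldl pvTog PySem.Set.empty).length = (xs.foldl pvTog PySem.Set.empty).length := by
  obtain ⟨hnd1, hmem1⟩ := pvTog_fold ys PySem.Set.empty (by simp [PySem.Set.empty])
  obtain ⟨hnd2, hmem2⟩ := pvTog_fold xs PySem.Set.empty (by simp [PySem.Set.empty])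
  apply List.Perm.length_eq
  rw [List.perm_ext_iff_of_nodup hnd1 hnd2]
  intro y
  rw [hmem1 y, hmem2 y, h.count_eq]

-- toggling a run of m equal elements from the empty set
lemma pvRepFold (a : Int) : ∀ m : Nat, (List.replicate m a).foldl pvTog PySem.Set.empty
    = if m % 2 = 1 then PySem.Set.add PySem.Set.empty a else PySem.Set.empty := by
  intro m
  induction m with
  | zero => simp
  | succ m ih =>
    rw [List.replicate_succ', List.foldl_append, ih]
    by_cases h : m % 2 = 1
    · rw [if_pos h, if_neg (by omega)]
      simp [pvTog, PySem.Set.add, PySem.Set.discard, PySem.Set.contains, PySem.Set.empty]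
    · rw [if_neg h, if_pos (by omega)]
      simp [pvTog, PySem.Set.add, PySem.Set.contains, PySem.Set.empty]

-- an extra element not occurring in the list adds exactly one to the toggle-set length
lemma pvLenSingleton (a : Int) (ys : List Int) (ha : a ∉ ys) :
    (ys.foldl pvTog (PySem.Set.add PySem.Set.empty a)).length
      = (ys.foldl pvTog PySem.Set.empty).length + 1 := by
  have hnds : (PySem.Set.add PySem.Set.empty a).Nodup := by
    simp [PySem.Set.add, PySem.Set.contains, PySem.Set.empty]
  obtain ⟨hnd1, hmem1⟩ := pvTog_fold ys (PySem.Set.add PySem.Set.empty a) hnds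
  obtain ⟨hnd0, hmem0⟩ := pvTog_fold ys PySem.Set.empty (by simp [PySem.Set.empty])
  have hcnt : ys.count a = 0 := List.count_eq_zero.mpr ha
  have haF0 : a ∉ ys.foldl pvTog PySem.Set.empty := by
    rw [hmem0 a]; simp [PySem.Set.empty, hcnt]
  have hperm : (ys.foldl pvTog (PySem.Set.add PySem.Set.empty a)).Perm
      (a :: ys.foldl pvTog PySem.Set.empty) := by
    rw [List.perm_ext_iff_of_nodup hnd1 (List.nodup_cons.mpr ⟨haF0, hnd0⟩)]
    intro y
    rw [hmem1 y, List.mem_cons, hmem0 y]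
    by_cases hya : y = a
    · subst hya
      simp [PySem.Set.empty, hcnt]
    · simp [PySem.Set.empty, hya]
  simpa using hperm.length_eq

lemma pvLenApp (m : Nat) (a : Int) (ys : List Int) (ha : a ∉ ys) :
    ((((List.replicate m a ++ ys).foldl pvTog PySem.Set.empty).length : Int))
      = PySem.Int.mod (m : Int) 2 + ((ys.foldl pvTog PySem.Set.empty).length : Int) := by
  rw [List.foldl_append, pvRepFold]
  have hm : PySem.Int.mod (m : Int) 2 = ((m % 2 : Nat) : Int) := PySem.Int.mod_natCast m 2
  by_cases h : m % 2 = 1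
  · rw [if_pos h, pvLenSingleton a ys ha, hm, h]; push_cast; ring
  · rw [if_neg h, hm]
    have : m % 2 = 0 := by omega
    rw [this]; push_cast; ring

-- B's odd flag is additive in the scan state
lemma pvFin_add (ys : List Int) : ∀ (odd run : Int) (prev : Option Int) (c : Int),
    (ys.foldl pvStepB (odd + c, run, prev)).1 + PySem.Int.mod (ys.foldl pvStepB (odd + c, run, prev)).2.1 2
      = c + ((ys.foldl pvStepB (odd, run, prev)).1 + PySem.Int.mod (ys.foldl pvStepB (odd, run, prev)).2.1 2) := by
  induction ys with
  | nil => intro odd run prev c; simp; ring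
  | cons x t ih =>
    intro odd run prev c
    by_cases h : prev = some x
    · simp only [List.foldl_cons, pvStepB, h, reduceIte]
      exact ih odd (run + 1) (some x) c
    · simp only [List.foldl_cons, pvStepB, if_neg h]
      have := ih (odd + PySem.Int.mod run 2) 1 (some x) c
      calc (t.foldl pvStepB (odd + c + PySem.Int.mod run 2, 1, some x)).1
              + PySem.Int.mod (t.foldl pvStepB (odd + c + PySem.Int.mod run 2, 1, some x)).2.1 2
          = (t.foldl pvStepB (odd + PySem.Int.mod run 2 + c, 1, some x)).1
              + PySem.Int.mod (t.foldl pvStepB (odd + PySem.Int.mod run 2 + c, 1, some x)).2.1 2 := by ring_nf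
        _ = c + ((t.foldl pvStepB (odd + PySem.Int.mod run 2, 1, some x)).1
              + PySem.Int.mod (t.foldl pvStepB (odd + PySem.Int.mod run 2, 1, some x)).2.1 2) := this

-- main invariant: a scan in state (0, m, some a), over a sorted tail whose elements all dominate a,
-- computes the toggle-set size of (replicate m a ++ tail)
lemma pvScanG : ∀ ys : List Int, ys.Pairwise (· ≤ ·) → ∀ a : Int, (∀ y ∈ ys, a ≤ y) → ∀ m : Nat,
    (ys.foldl pvStepB (0, (m : Int), some a)).1 + PySem.Int.mod (ys.foldl pvStepB (0, (m : Int), some a)).2.1 2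
      = (((List.replicate m a ++ ys).foldl pvTog PySem.Set.empty).length : Int) := by
  intro ys
  induction ys with
  | nil =>
    intro _ a _ m
    rw [pvLenApp m a [] (by simp)]
    simp
  | cons b t ih =>
    intro hpw a hle m
    have hpwt : t.Pairwise (· ≤ ·) := hpw.tail
    have hbt : ∀ y ∈ t, b ≤ y := fun y hy => (List.pairwise_cons.mp hpw).1 y hy
    have hab : a ≤ b := hle b (by simp)
    by_cases hEq : a = b
    · subst hEq
      simp only [List.foldl_cons, pvStepB, reduceIte]
      have := ih hpwt a hbt (m + 1)
      rw [show ((m : Int) + 1) = ((m + 1 : Nat) : Int) by push_cast; ring, this]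
      rw [show List.replicate m a ++ a :: t = List.replicate (m + 1) a ++ t by
        rw [List.replicate_succ', List.append_assoc]; rfl]
    · have hne : (some a : Option Int) ≠ some b := by simpa using hEq
      simp only [List.foldl_cons, pvStepB, if_neg hne]
      have hant : a ∉ b :: t := by
        intro hmem
        rcases List.mem_cons.mp hmem with h | h
        · exact hEq h
        · have := hbt a h
          omega
      have h1 : (t.foldl pvStepB (0 + PySem.Int.mod (m : Int) 2, 1, some b)).1
            + PySem.Int.mod (t.foldl pvStepB (0 + PySem.Int.mod (m : Int) 2, 1, some b)).2.1 2
          = PySem.Int.mod (m : Int) 2 + ((t.foldl pvStepB (0, (1 : Int), some b)).1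
            + PySem.Int.mod (t.foldl pvStepB (0, (1 : Int), some b)).2.1 2) :=
        pvFin_add t 0 1 (some b) (PySem.Int.mod (m : Int) 2)
      have h2 := ih hpwt b hbt 1
      rw [show ((1 : Nat) : Int) = (1 : Int) by norm_num] at h2
      simp only [List.replicate_one, List.cons_append, List.nil_append] at h2
      rw [h1, h2, pvLenApp m a (b :: t) hant]

-- odd_runs computes the toggle-set size
lemma pvOddRuns_eq (xs : List Int) :
    pvOddRuns xs = ((xs.foldl pvTog PySem.Set.empty).length : Int) := by
  unfold pvOddRuns
  show ((PySem.List.sorted xs (fun x => x) false).foldl pvStepB (0, 0, none)).1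
      + PySem.Int.mod ((PySem.List.sorted xs (fun x => x) false).foldl pvStepB (0, 0, none)).2.1 2
    = ((xs.foldl pvTog PySem.Set.empty).length : Int)
  have hperm := PySem.List.sorted_perm (xs := xs) (key := fun x => x) (rev := false)
  rw [← pvTogLen_perm _ _ hperm]
  cases hs : PySem.List.sorted xs (fun x => x) false with
  | nil => simp [PySem.Int.mod]
  | cons b t =>
    have hpw : (b :: t).Pairwise (fun p q => p ≤ q) := by
      have := PySem.List.sorted_pairwise (xs := xs) (key := fun x => x)
      rw [hs] at this
      exact this
    simp only [List.foldl_cons, pvStepB, reduceCtorEq, reduceIte]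
    have h0 : PySem.Int.mod (0 : Int) 2 = 0 := by decide
    rw [h0, add_zero]
    have := pvScanG t hpw.tail b (fun y hy => (List.pairwise_cons.mp hpw).1 y hy) 1
    rw [show ((1 : Nat) : Int) = (1 : Int) by norm_num] at this
    simpa using this

-- A's loop splits into two independent toggle folds over the row / column projections
lemma pvOddA_eq (rows cols : Int) (points : List (Int × Int)) :
    oddmatrix rows cols points =
      ((((points.map Prod.fst).foldl pvTog PySem.Set.empty).length : Int)) *
        (cols - (((points.map Prod.snd).foldl pvTog PySem.Set.empty).length : Int)) +
      (((points.map Prod.snd).foldl pvTog PySem.Set.empty).length : Int) *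
        (rows - (((points.map Prod.fst).foldl pvTog PySem.Set.empty).length : Int)) := by
  unfold oddmatrix
  show (let st := points.foldl (fun st p => (pvTog st.1 p.1, pvTog st.2 p.2))
          ((PySem.Set.empty : PySem.Set Int), (PySem.Set.empty : PySem.Set Int));
        (st.1.length : Int) * (cols - (st.2.length : Int)) + (st.2.length : Int) * (rows - (st.1.length : Int))) = _
  rw [PySem.List.foldl_prod_mk (f := fun s (p : Int × Int) => pvTog s p.1)
        (g := fun s (p : Int × Int) => pvTog s p.2)]
  rw [← List.foldl_map (f := Prod.fst) (g := pvTog), ← List.foldl_map (f := Prod.snd) (g := pvTog)]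

-- ===== VERDICT (by name: the statement is the Claim_ definition above) =====
theorem oddmatrix_spec : Claim_equal_oddmatrix := by
  intro rows cols points _
  unfold Spec_oddmatrix oddmatrix_alt
  rw [pvOddA_eq, pvOddRuns_eq, pvOddRuns_eq]
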